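-- pv_equiv track=rewrite | github.com/ASSERT-KTH/Mokav | experiments/pynguin/c4b/single-return/generated_tests/src_686/1/src_686.py | func
-- ===== SOURCE A (Python) =====
-- def func(*args):
--
-- 	s = (lambda x: ((x * (x + 1)) // 2))
-- 	n = int(args[0])
-- 	(lo, hi) = (0, (10 ** 10))
-- 	while (lo != hi):
-- 	    mid = (((lo + hi) + 1) // 2)
-- 	    if (s(mid) < n):
-- 	        lo = mid
-- 	    else:
-- 	        hi = (mid - 1)
-- 	return((n - s(lo)))
-- ===== SOURCE B (Python) =====
-- import math
--
-- def func(*args):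
--     n = int(args[0])
--     if n <= 0:
--         return n
--     lo = (math.isqrt(8 * n - 7) - 1) // 2
--     return n - lo * (lo + 1) // 2
-- ===== Notes on version B (the rewrite author's own statement) =====
-- stated objective: simpler
-- what changed: Replaces the logarithmic binary search for the largest triangular index below n by a closed form computed directly with math.isqrt (constant number of arithmetic operations, no loop).
import Mathlib
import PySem

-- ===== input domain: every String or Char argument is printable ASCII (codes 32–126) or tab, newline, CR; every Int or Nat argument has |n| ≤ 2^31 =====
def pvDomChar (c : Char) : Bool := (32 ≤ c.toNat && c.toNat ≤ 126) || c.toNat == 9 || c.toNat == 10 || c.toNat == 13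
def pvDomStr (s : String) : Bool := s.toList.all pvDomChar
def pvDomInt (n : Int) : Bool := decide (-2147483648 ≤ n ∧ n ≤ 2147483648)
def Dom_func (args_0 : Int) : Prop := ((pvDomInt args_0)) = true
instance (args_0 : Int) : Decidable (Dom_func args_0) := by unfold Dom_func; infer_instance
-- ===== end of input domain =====

-- B replaces A's 34-step binary search for the triangular index with a closed form
-- using the integer square root (objective: simpler, O(1) arithmetic instead of a loop).

-- ===== PORT A =====
-- while (lo != hi): ported as fuel recursion; fuel 10^10 ≥ hi - lo bounds the
-- iteration count (the search range shrinks every step), so fuel never runs out.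
def funcLoop (n : Int) : Nat → Int → Int → Int
  | 0, lo, _ => lo
  | fuel + 1, lo, hi =>
    if lo ≠ hi then
      let mid := PySem.Int.floordiv (lo + hi + 1) 2
      if PySem.Int.floordiv (mid * (mid + 1)) 2 < n then funcLoop n fuel mid hi
      else funcLoop n fuel lo (mid - 1)
    else lo

def func (args_0 : Int) : Int :=
  let n := args_0
  let lo := funcLoop n (10 ^ 10) 0 (10 ^ 10)
  n - PySem.Int.floordiv (lo * (lo + 1)) 2

-- ===== PORT B =====
-- math.isqrt m = Nat.sqrt m.toNat (exact: 8*n-7 ≥ 1 in this branch)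
def func_alt (args_0 : Int) : Int :=
  let n := args_0
  if n ≤ 0 then n
  else
    let lo : Int := PySem.Int.floordiv ((Nat.sqrt (8 * n - 7).toNat : Int) - 1) 2
    n - PySem.Int.floordiv (lo * (lo + 1)) 2

-- ===== PRECONDITION & SPEC =====
def Spec_func (args_0 : Int) (out : Int) : Prop := out = func_alt args_0
instance (args_0 : Int) (out : Int) : Decidable (Spec_func args_0 out) := by unfold Spec_func; infer_instance

-- ===== CLAIM (what is proved, stated in full; the proofs are below) =====
def Claim_equal_func : Prop := ∀ (args_0 : Int), Dom_func args_0 → Spec_func args_0 (func args_0)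

-- ===== LEMMAS AND PROOFS =====

-- s(x) < n  ↔  x(x+1) < 2n
lemma s_lt_iff (x n : Int) : PySem.Int.floordiv (x * (x + 1)) 2 < n ↔ x * (x + 1) < 2 * n := by
  rw [PySem.Int.floordiv_lt_iff_lt_mul (by norm_num)]
  constructor <;> intro h <;> linarith

-- The binary search returns t whenever t is in [lo,hi] and characterised by:
-- every x in [1,t] is "good" (x(x+1) < 2n), and every good x in [0,10^10] is ≤ t.
lemma loop_eq (n t : Int)
    (hP1 : ∀ x : Int, 1 ≤ x → x ≤ t → x * (x + 1) < 2 * n)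
    (hP2 : ∀ x : Int, 0 ≤ x → x ≤ 10 ^ 10 → x * (x + 1) < 2 * n → x ≤ t) :
    ∀ (fuel : Nat) (lo hi : Int), 0 ≤ lo → lo ≤ t → t ≤ hi → hi ≤ 10 ^ 10 →
      (hi - lo).toNat ≤ fuel → funcLoop n fuel lo hi = t := by
  intro fuel
  induction fuel with
  | zero =>
    intro lo hi _ h1 h2 _ hf
    simp only [funcLoop]
    omega
  | succ fuel ih =>
    intro lo hi hlo0 hlot hthi hhi hf
    by_cases hne : lo = hi
    · simp only [funcLoop, hne, ne_eq, not_true_eq_false, if_false]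
      omega
    · have hlh : lo < hi := by omega
      have hmid : lo + 1 ≤ PySem.Int.floordiv (lo + hi + 1) 2 ∧
          PySem.Int.floordiv (lo + hi + 1) 2 ≤ hi := by
        rw [PySem.Int.floordiv_eq_ediv_of_pos (by norm_num)]
        omega
      simp only [funcLoop, ne_eq, hne, not_false_eq_true, if_true]
      set mid := PySem.Int.floordiv (lo + hi + 1) 2 with hm
      by_cases hs : PySem.Int.floordiv (mid * (mid + 1)) 2 < n
      · rw [if_pos hs]
        have hmt : mid ≤ t := hP2 mid (by omega) (by omega) ((s_lt_iff mid n).mp hs)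
        exact ih mid hi (by omega) hmt hthi hhi (by omega)
      · rw [if_neg hs]
        have htm : t ≤ mid - 1 := by
          by_contra hc
          exact hs ((s_lt_iff mid n).mpr (hP1 mid (by omega) (by omega)))
        exact ih lo (mid - 1) hlo0 hlot htm (by omega) (by omega)

lemma even_consec (x : Int) : ∃ k : Int, x * (x + 1) = 2 * k := by
  rcases Int.even_mul_succ_self x with ⟨k, hk⟩
  exact ⟨k, by omega⟩

-- ===== VERDICT (by name: the statement is the Claim_ definition above) =====
theorem func_spec : Claim_equal_func := by
  intro n hdom
  have hd : -2147483648 ≤ n ∧ n ≤ 2147483648 := by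
    simpa [Dom_func, pvDomInt] using hdom
  unfold Spec_func func func_alt
  by_cases hn : n ≤ 0
  · -- t = 0: no positive x is good since x(x+1) ≥ 0 ≥ 2n
    have hloop : funcLoop n (10 ^ 10) 0 (10 ^ 10) = 0 := by
      apply loop_eq n 0
      · intro x hx1 hx0; omega
      · intro x hx0 _ hxg; nlinarith
      all_goals norm_num
    simp only [hloop, if_pos hn]
    norm_num [PySem.Int.floordiv]
  · push Not at hn
    rw [if_neg (by omega)]
    set q : Int := (Nat.sqrt (8 * n - 7).toNat : Int) with hq
    set t : Int := PySem.Int.floordiv (q - 1) 2 with htdef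
    have hm : ((8 * n - 7).toNat : Int) = 8 * n - 7 := by omega
    have hq2 : q ^ 2 ≤ 8 * n - 7 := by
      rw [hq, ← hm]
      exact_mod_cast Nat.sqrt_le' (8 * n - 7).toNat
    have hq3 : 8 * n - 7 < (q + 1) ^ 2 := by
      rw [hq, ← hm]
      have := Nat.lt_succ_sqrt' (8 * n - 7).toNat
      push_cast [Nat.succ_eq_add_one] at this ⊢
      exact_mod_cast this
    have hq1 : 1 ≤ q := by nlinarith
    have hqb : q ≤ 131072 := by nlinarith
    have ht : 2 * t ≤ q - 1 ∧ q - 1 ≤ 2 * t + 1 := by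
      rw [htdef, PySem.Int.floordiv_eq_ediv_of_pos (by norm_num)]
      omega
    have ht0 : 0 ≤ t := by omega
    -- t is good-maximal: t(t+1) ≤ 2n-2 from (2t+1)² ≤ q² ≤ 8n-7
    have htg : t * (t + 1) ≤ 2 * n - 2 := by nlinarith
    -- and t+1 is not good: (t+1)(t+2) ≥ 2n from (2t+3)² ≥ (q+1)² ≥ 8n-6 plus parity
    have hts : 2 * n ≤ (t + 1) * (t + 2) := by
      have h4 : 8 * n - 7 ≤ 4 * ((t + 1) * (t + 2)) := by nlinarith
      rcases even_consec (t + 1) with ⟨k, hk⟩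
      have hk2 : (t + 1) * (t + 2) = 2 * k := by linear_combination hk
      rw [hk2] at h4 ⊢
      omega
    have hloop : funcLoop n (10 ^ 10) 0 (10 ^ 10) = t := by
      apply loop_eq n t
      · intro x hx1 hxt; nlinarith
      · intro x hx0 _ hxg
        by_contra hc
        push Not at hc
        nlinarith
      · norm_num
      · omega
      · omega
      · norm_num
      · omega
    simp only [hloop]
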